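-- pv_equiv track=rewrite | github.com/pc5401/my_BOJ | 백준/Silver/6504. 킬로미터를 마일로/킬로미터를 마일로.py | solve
-- ===== SOURCE A (Python) =====
-- def solve(t: int, km_lst: list[int]) -> list[int]:
--     fibo = [1, 2]
--     while fibo[-1] <= 25000:
--         fibo.append(fibo[-1] + fibo[-2])
--
--     result = []
--     for orig_x in km_lst:
--         x = orig_x
--         rep = ""
--         flag = False
--         for num in reversed(fibo):
--             if num <= x:
--                 rep += "1"
--                 x -= num
--                 flag = True
--             else:
--                 if flag:
--                     rep += "0"
--
--         if len(rep) <= 1: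
--             result.append(0)
--         else:
--             rep_shifted = rep[:-1]
--             rep_rev = rep_shifted[::-1]
--             y = 0
--             for i, ch in enumerate(rep_rev):
--                 if ch == '1':
--                     y += fibo[i]
--             result.append(y)
--     return result
-- ===== SOURCE B (Python) =====
-- def solve(t: int, km_lst: list[int]) -> list[int]:
--     fibo = [1, 2]
--     while fibo[-1] <= 25000:
--         fibo.append(fibo[-1] + fibo[-2])
--
--     pairs = list(zip(fibo[1:], fibo))
--     result = []
--     for x in km_lst:
--         y = 0
--         for hi, lo in reversed(pairs):
--             if hi <= x:
--                 x -= hi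
--                 y += lo
--         result.append(y)
--     return result
-- ===== Notes on version B (the rewrite author's own statement) =====
-- stated objective: simpler
-- what changed: Instead of building a '0'/'1' Zeckendorf digit string per query and then slicing off the last digit, reversing it and summing fibo[i] in a second pass, B zips the Fibonacci list with its shift once and does a single greedy pass per query that accumulates the shifted Fibonacci value directly in a running sum.
import Mathlib
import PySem

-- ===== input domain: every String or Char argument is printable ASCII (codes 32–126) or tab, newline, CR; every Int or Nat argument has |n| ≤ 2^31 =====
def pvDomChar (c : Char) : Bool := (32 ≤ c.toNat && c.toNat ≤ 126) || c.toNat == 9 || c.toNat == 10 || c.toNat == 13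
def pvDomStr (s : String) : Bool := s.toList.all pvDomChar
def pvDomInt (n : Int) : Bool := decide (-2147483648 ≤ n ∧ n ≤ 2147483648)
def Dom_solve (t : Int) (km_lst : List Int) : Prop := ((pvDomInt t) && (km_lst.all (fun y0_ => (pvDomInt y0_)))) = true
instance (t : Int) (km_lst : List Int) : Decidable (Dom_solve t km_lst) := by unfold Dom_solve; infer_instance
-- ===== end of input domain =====

-- B replaces A's digit-string construction, [:-1] slice, reversal and second summing pass by a
-- single greedy pass accumulating the shifted Fibonacci values in a running sum (simpler; measured faster by a constant factor).


-- ===== PORT A =====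
-- fibo = [1, 2]; while fibo[-1] <= 25000: fibo.append(fibo[-1] + fibo[-2])
-- (fuel only makes the while-loop total; 100 is far more than the 20 iterations performed)
def fibWhileA (fuel : Nat) (fibo : List Int) : List Int :=
  match fuel with
  | 0 => fibo
  | fuel + 1 =>
    if PySem.List.pyGetD fibo (-1) 0 ≤ 25000 then
      fibWhileA fuel (fibo ++ [PySem.List.pyGetD fibo (-1) 0 + PySem.List.pyGetD fibo (-2) 0])
    else fibo

-- body of `for num in reversed(fibo)` acting on the state (x, rep, flag); rep (a Python str of
-- '0'/'1') is carried as its code-point list, the PySem.Chars convention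
def stepA (st : Int × List Char × Bool) (num : Int) : Int × List Char × Bool :=
  if num ≤ st.1 then (st.1 - num, st.2.1 ++ ['1'], true)
  else (st.1, if st.2.2 then st.2.1 ++ ['0'] else st.2.1, st.2.2)

-- everything A does for one element orig_x of km_lst
def innerA (fibo : List Int) (orig_x : Int) : Int :=
  let st := fibo.reverse.foldl stepA (orig_x, [], false)
  let rep := st.2.1
  if (PySem.Chars.len rep : Int) ≤ 1 then 0
  else
    let rep_shifted := PySem.Chars.slice rep none (some (-1))            -- rep[:-1]
    let rep_rev := (PySem.Chars.slice? rep_shifted none none (-1)).getD []  -- rep[::-1] (step -1 ≠ 0, never none)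
    (PySem.List.enumerate rep_rev 0).foldl
      (fun y p => if p.2 = '1' then y + PySem.List.pyGetD fibo p.1 0 else y) 0
      -- fibo[i]: i < len(rep)-1 ≤ len(fibo), always in range, so the total pyGetD is exact here

def solve (t : Int) (km_lst : List Int) : List Int :=
  let fibo := fibWhileA 100 [1, 2]
  km_lst.foldl (fun result orig_x => result ++ [innerA fibo orig_x]) []

-- ===== PORT B =====
-- Source B builds fibo by the same while loop
def fibWhileB (fuel : Nat) (fibo : List Int) : List Int :=
  match fuel with
  | 0 => fibo
  | fuel + 1 =>
    if PySem.List.pyGetD fibo (-1) 0 ≤ 25000 then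
      fibWhileB fuel (fibo ++ [PySem.List.pyGetD fibo (-1) 0 + PySem.List.pyGetD fibo (-2) 0])
    else fibo

-- body of `for hi, lo in reversed(pairs)` acting on the state (x, y)
def stepB (st : Int × Int) (p : Int × Int) : Int × Int :=
  if p.1 ≤ st.1 then (st.1 - p.1, st.2 + p.2) else st

def innerB (pairs : List (Int × Int)) (x : Int) : Int :=
  (pairs.reverse.foldl stepB (x, 0)).2

def solve_alt (t : Int) (km_lst : List Int) : List Int :=
  let fibo := fibWhileB 100 [1, 2]
  let pairs := List.zip (fibo.drop 1) fibo      -- list(zip(fibo[1:], fibo))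
  km_lst.foldl (fun result x => result ++ [innerB pairs x]) []

-- ===== PRECONDITION & SPEC =====
def Spec_solve (t : Int) (km_lst : List Int) (out : List Int) : Prop := out = solve_alt t km_lst
instance (t : Int) (km_lst : List Int) (out : List Int) : Decidable (Spec_solve t km_lst out) := by unfold Spec_solve; infer_instance

-- ===== CLAIM (what is proved, stated in full; the proofs are below) =====
def Claim_equal_solve : Prop := ∀ (t : Int) (km_lst : List Int), Dom_solve t km_lst → Spec_solve t km_lst (solve t km_lst)

-- ===== LEMMAS AND PROOFS =====

-- the greedy digit string A builds, one char per processed element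
def chars : List Int → Int → List Char
  | [], _ => []
  | a :: r, x => if a ≤ x then '1' :: chars r (x - a) else '0' :: chars r x

-- leftover x after the greedy pass (A's final x, not used in the result)
def fin : List Int → Int → Int
  | [], x => x
  | a :: r, x => if a ≤ x then fin r (x - a) else fin r x

-- what B's single pass computes
def valB : List Int → Int → Int
  | a :: b :: r, x => if a ≤ x then b + valB (b :: r) (x - a) else valB (b :: r) x
  | _, _ => 0

-- positionwise weighted sum: sz g s = Σ over common positions of (if s_i = '1' then g_i else 0)
def sz : List Int → List Char → Int
  | b :: g, c :: s => (if c = '1' then b else 0) + sz g s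
  | _, _ => 0

theorem sz_nil_left (s : List Char) : sz [] s = 0 := by cases s <;> rfl

theorem sz_nil_right (g : List Int) : sz g [] = 0 := by cases g <;> rfl

theorem chars_length (r : List Int) (x : Int) : (chars r x).length = r.length := by
  induction r generalizing x with
  | nil => rfl
  | cons a r ih => simp only [chars]; split <;> simp [ih]

theorem foldlA_true (r : List Int) (x : Int) (rep : List Char) :
    r.foldl stepA (x, rep, true) = (fin r x, rep ++ chars r x, true) := by
  induction r generalizing x rep with
  | nil => simp [fin, chars]
  | cons a r ih =>
    simp only [List.foldl_cons, stepA, fin, chars]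
    by_cases h : a ≤ x <;> simp [h, ih]

theorem foldlA_false (r : List Int) (x : Int) :
    (r.foldl stepA (x, [], false)).2.1 = (chars r x).dropWhile (· == '0') := by
  induction r generalizing x with
  | nil => rfl
  | cons a r ih =>
    simp only [List.foldl_cons, stepA, chars]
    by_cases h : a ≤ x
    · simp [h, foldlA_true]
    · simpa [h] using ih x

theorem foldlB (r : List Int) (x y : Int) :
    ((List.zip r r.tail).foldl stepB (x, y)).2 = y + valB r x := by
  induction r generalizing x y with
  | nil => simp [valB]
  | cons a r ih =>
    cases r with
    | nil => simp [valB]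
    | cons b r =>
      simp only [List.tail_cons, List.zip_cons_cons, List.foldl_cons, stepB, valB]
      by_cases h : a ≤ x
      · simp only [h, if_pos]
        rw [show (List.zip (b :: r) r) = List.zip (b :: r) (b :: r).tail from rfl, ih]
        ring
      · simp only [h, if_neg, not_false_iff]
        rw [show (List.zip (b :: r) r) = List.zip (b :: r) (b :: r).tail from rfl, ih]

-- B's value = the tail-weighted sum of A's full digit string
theorem valB_eq_sz (r : List Int) (x : Int) : valB r x = sz r.tail (chars r x) := by
  induction r generalizing x with
  | nil => simp [valB, sz_nil_left]
  | cons a r ih =>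
    cases r with
    | nil => simp [valB, sz_nil_left]
    | cons b r =>
      simp only [List.tail_cons, chars]
      by_cases h : a ≤ x
      · have hih := ih (x - a)
        simp only [List.tail_cons] at hih
        simp only [valB, h, if_pos, sz, hih]
        rfl
      · have hih := ih x
        simp only [List.tail_cons] at hih
        simp [valB, h, sz, hih]
        rfl

-- a '0'-prefix contributes nothing and just shifts the weights
theorem sz_zeros (zeros : List Char) (h : ∀ c ∈ zeros, c = '0') (g : List Int) (s : List Char) :
    sz g (zeros ++ s) = sz (g.drop zeros.length) s := by
  induction zeros generalizing g with
  | nil => simp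
  | cons c zs ih =>
    have hc : c = '0' := h c (by simp)
    cases g with
    | nil => simp [sz_nil_left]
    | cons b g =>
      simp only [List.cons_append, sz, hc, List.length_cons, List.drop_succ_cons]
      rw [ih (fun d hd => h d (by simp [hd])) g]
      simp

-- extra chars beyond g's length are ignored
theorem sz_append_right (g : List Int) (s extra : List Char) (h : g.length ≤ s.length) :
    sz g (s ++ extra) = sz g s := by
  induction g generalizing s with
  | nil => simp [sz_nil_left]
  | cons b g ih =>
    cases s with
    | nil => simp at h
    | cons c s => simp only [List.cons_append, sz]; rw [ih s (by simpa using h)]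

theorem sz_take (g : List Int) (s : List Char) (h : s.length ≤ g.length) (m : Nat) (hm : s.length ≤ m) :
    sz (g.take m) s = sz g s := by
  induction g generalizing s m with
  | nil => simp
  | cons b g ih =>
    cases s with
    | nil => simp [sz_nil_right]
    | cons c s =>
      cases m with
      | zero => simp at hm
      | succ m =>
        simp only [List.take_succ_cons, sz]
        rw [ih s (by simpa using h) m (by simpa using hm)]

theorem sz_append (g : List Int) (u : List Char) (b : Int) (c : Char) (h : g.length = u.length) :
    sz (g ++ [b]) (u ++ [c]) = sz g u + (if c = '1' then b else 0) := by
  induction g generalizing u with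
  | nil =>
    cases u with
    | nil => simp [sz]
    | cons _ _ => simp at h
  | cons b' g ih =>
    cases u with
    | nil => simp at h
    | cons c' u =>
      simp only [List.cons_append, sz]
      rw [ih u (by simpa using h)]
      ring

theorem sz_reverse (g : List Int) (u : List Char) (h : g.length = u.length) :
    sz g.reverse u.reverse = sz g u := by
  induction g generalizing u with
  | nil =>
    cases u with
    | nil => rfl
    | cons _ _ => simp at h
  | cons b g ih =>
    cases u with
    | nil => simp at h
    | cons c u =>
      simp only [List.reverse_cons, sz]
      rw [sz_append _ _ _ _ (by simpa using h), ih u (by simpa using h)]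
      ring

-- the enumerate/lookup summing loop in A is the positionwise sum sz
theorem enumFold_eq_sz (f : List Int) (s : List Char) (k : Nat) (y : Int) :
    (PySem.List.enumerate s (k : Int)).foldl
      (fun y p => if p.2 = '1' then y + PySem.List.pyGetD f p.1 0 else y) y
    = y + sz (f.drop k) s := by
  induction s generalizing k y with
  | nil => simp [PySem.List.enumerate_nil, sz_nil_right]
  | cons c s ih =>
    rw [PySem.List.enumerate_cons, List.foldl_cons]
    have hk1 : ((k : Int) + 1) = ((k + 1 : Nat) : Int) := by push_cast; ring
    rw [hk1, ih]
    by_cases hlt : k < f.length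
    · have hdrop : f.drop k = f[k] :: f.drop (k + 1) := (List.getElem_cons_drop hlt).symm
      have hget : PySem.List.pyGetD f (k : Int) 0 = f[k] := by
        rw [PySem.List.pyGetD_natCast]; exact List.getD_eq_getElem f 0 hlt
      rw [hdrop]
      simp only [sz, hget]
      split <;> ring
    · have h1 : f.drop k = [] := List.drop_eq_nil_of_le (by omega)
      have h2 : f.drop (k + 1) = [] := List.drop_eq_nil_of_le (by omega)
      have hget : PySem.List.pyGetD f (k : Int) 0 = 0 := by
        rw [PySem.List.pyGetD_natCast]; exact List.getD_eq_default f 0 (by omega)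
      rw [h1, h2, sz_nil_left, sz_nil_left, hget]
      split <;> ring

-- zip truncates to the shorter list: the longer side may be pre-truncated
theorem zip_take_right {A B : Type} (l : List A) (l' : List B) :
    List.zip l l' = List.zip l (l'.take l.length) := by
  induction l generalizing l' with
  | nil => simp
  | cons a l ih =>
    cases l' with
    | nil => simp
    | cons b l' => simp [List.zip_cons_cons, ih l']

theorem zip_take_left {A B : Type} (l : List A) (l' : List B) :
    List.zip l l' = List.zip (l.take l'.length) l' := by
  induction l generalizing l' with
  | nil => simp
  | cons a l ih =>
    cases l' with
    | nil => simp
    | cons b l' => simp [List.zip_cons_cons, ih l']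

theorem zip_rev {A B : Type} (l : List A) (l' : List B) (h : l.length = l'.length) :
    (List.zip l l').reverse = List.zip l.reverse l'.reverse := by
  induction l generalizing l' with
  | nil =>
    cases l' with
    | nil => rfl
    | cons _ _ => simp at h
  | cons a l ih =>
    cases l' with
    | nil => simp at h
    | cons b l' =>
      have h' : l.length = l'.length := by simpa using h
      simp only [List.zip_cons_cons, List.reverse_cons]
      rw [List.zip_append (by simpa using h'), ih l' h']
      rfl

-- reversed(list(zip(fibo[1:], fibo))) pairs each reversed-order element with its successor
theorem zip_shift_reverse (f : List Int) :
    (List.zip (f.drop 1) f).reverse = List.zip f.reverse f.reverse.tail := by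
  rw [zip_take_right (f.drop 1) f]
  have h1 : f.take (f.drop 1).length = f.dropLast := by
    rw [List.length_drop, List.dropLast_eq_take]
  rw [h1, zip_rev _ _ (by simp [List.length_dropLast])]
  rw [List.drop_one, ← List.dropLast_reverse, ← List.tail_reverse]
  rw [zip_take_left f.reverse f.reverse.tail]
  congr 1
  rw [List.length_tail, List.dropLast_eq_take, List.length_reverse]

-- per-element equivalence, generic in the Fibonacci list f
theorem inner_eq (f : List Int) (x : Int) :
    innerA f x = innerB (List.zip (f.drop 1) f) x := by
  unfold innerB
  rw [zip_shift_reverse, foldlB, zero_add, valB_eq_sz]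
  unfold innerA
  simp only [foldlA_false]
  set s := chars f.reverse x with hs
  have hslen : s.length = f.length := by rw [hs, chars_length, List.length_reverse]
  set rep := s.dropWhile (fun c => c == '0') with hrep
  have hsplit : s.takeWhile (fun c => c == '0') ++ rep = s := List.takeWhile_append_dropWhile
  have hzero : ∀ c ∈ s.takeWhile (fun c => c == '0'), c = '0' := by
    intro c hc
    simpa using List.mem_takeWhile_imp hc
  set k := (s.takeWhile (fun c => c == '0')).length with hk
  clear_value s rep k
  have hkrep : k + rep.length = f.length := by
    have hl := congrArg List.length hsplit
    rw [List.length_append] at hl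
    omega
  have hsz : sz f.reverse.tail s = sz (f.reverse.tail.drop k) rep := by
    conv_lhs => rw [← hsplit]
    rw [hk]
    exact sz_zeros _ hzero _ _
  rw [hsz]
  have hdrop : f.reverse.tail.drop k = (f.take (rep.length - 1)).reverse := by
    rw [← List.drop_one, List.drop_drop, List.drop_reverse]
    have h1 : f.length - (1 + k) = rep.length - 1 := by omega
    rw [h1]
  by_cases hlen : (PySem.Chars.len rep : Int) ≤ 1
  · -- A appends 0; the weighted sum over at most the lone lowest digit is 0 too
    rw [if_pos hlen]
    have hlen' : rep.length ≤ 1 := by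
      rw [PySem.Chars.len_eq] at hlen; exact_mod_cast hlen
    rcases Nat.le_one_iff_eq_zero_or_eq_one.mp hlen' with h0 | h1
    · rw [List.length_eq_zero_iff.mp h0, sz_nil_right]
    · have : f.reverse.tail.drop k = [] := by
        apply List.drop_eq_nil_of_le
        rw [List.length_tail, List.length_reverse]
        omega
      rw [this, sz_nil_left]
  · rw [if_neg hlen]
    have hlen2 : 2 ≤ rep.length := by
      rw [PySem.Chars.len_eq] at hlen
      omega
    have hrepne : rep ≠ [] := by
      intro h; rw [h] at hlen2; simp at hlen2
    -- rep[:-1] and its reversal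
    have hshift : PySem.Chars.slice rep none (some (-1)) = rep.dropLast := by
      rw [PySem.Chars.slice_eq_listSlice, PySem.List.slice_to_neg_one]
    have hrev : (PySem.Chars.slice? (rep.dropLast) none none (-1)).getD [] = rep.dropLast.reverse := by
      rw [PySem.Chars.slice?_eq_listSlice?, PySem.List.slice?_none_none_neg_one, Option.getD_some]
    rw [hshift, hrev]
    have henum := enumFold_eq_sz f (rep.dropLast.reverse) 0 0
    simp only [Nat.cast_zero, List.drop_zero, zero_add] at henum
    rw [henum, hdrop]
    -- sz over the reversed truncated weights = sz over the dropped-k weights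
    have hlast := List.dropLast_append_getLast hrepne
    have hldl : rep.dropLast.length = rep.length - 1 := List.length_dropLast
    have htakelen : (f.take (rep.length - 1)).length = rep.length - 1 := by
      rw [List.length_take]
      omega
    -- generalize the weight list to decouple it from rep
    have key : ∀ g : List Int, g.length = rep.length - 1 →
        sz g (rep.dropLast.reverse) = sz g.reverse rep := by
      intro g hg
      have h1 : sz g.reverse rep = sz g.reverse rep.dropLast := by
        conv_lhs => rw [← hlast]
        exact sz_append_right _ _ _ (by rw [List.length_reverse, hg, hldl])
      rw [h1, ← sz_reverse g rep.dropLast.reverse (by rw [List.length_reverse, hg, hldl]),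
          List.reverse_reverse]
    rw [← sz_take f (rep.dropLast.reverse) (by rw [List.length_reverse, hldl]; omega)
        (rep.length - 1) (by rw [List.length_reverse, hldl])]
    exact key _ htakelen

-- ===== VERDICT (by name: the statement is the Claim_ definition above) =====
theorem solve_spec : Claim_equal_solve := by
  intro t km_lst _
  unfold Spec_solve solve solve_alt
  have hfib : fibWhileB 100 [1, 2] = fibWhileA 100 [1, 2] := rfl
  rw [hfib]
  rw [PySem.List.foldl_append_singleton_eq_map, PySem.List.foldl_append_singleton_eq_map]
  exact List.map_congr_left (fun x _ => inner_eq _ x)
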